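-- pv_equiv track=rewrite | github.com/p1rscher/ataraxia | bot/cogs/economy/economy.py | clean_item_key
-- ===== SOURCE A (Python) =====
-- def clean_item_key(raw: str) -> str:
--     cleaned = []
--     for char in raw.lower().strip():
--         if char.isalnum() or char in {"_", "-"}:
--             cleaned.append(char)
--         elif char in {" ", "/"}:
--             cleaned.append("_")
--     result = "".join(cleaned).strip("_")
--     while "__" in result:
--         result = result.replace("__", "_")
--     return result[:32]
-- ===== SOURCE B (Python) =====
-- def clean_item_key(raw: str) -> str:
--     out = []
--     pending = False  # a separator ('_', ' ' or '/') seen since the last kept char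
--     for ch in raw.lower():
--         if ch.isalnum() or ch == "-":
--             if pending and out:
--                 out.append("_")
--             out.append(ch)
--             pending = False
--         elif ch in " /_":
--             pending = True
--     return "".join(out[:32])
-- ===== Notes on version B (the rewrite author's own statement) =====
-- stated objective: alternative
-- what changed: Replaces the build-then-postprocess pipeline (filter loop, strip('_'), repeated whole-string replace('__','_') until fixpoint, slice) by a single left-to-right pass with a pending-separator flag that emits at most one '_' between kept characters and never emits leading/trailing underscores.
import Mathlib
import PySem

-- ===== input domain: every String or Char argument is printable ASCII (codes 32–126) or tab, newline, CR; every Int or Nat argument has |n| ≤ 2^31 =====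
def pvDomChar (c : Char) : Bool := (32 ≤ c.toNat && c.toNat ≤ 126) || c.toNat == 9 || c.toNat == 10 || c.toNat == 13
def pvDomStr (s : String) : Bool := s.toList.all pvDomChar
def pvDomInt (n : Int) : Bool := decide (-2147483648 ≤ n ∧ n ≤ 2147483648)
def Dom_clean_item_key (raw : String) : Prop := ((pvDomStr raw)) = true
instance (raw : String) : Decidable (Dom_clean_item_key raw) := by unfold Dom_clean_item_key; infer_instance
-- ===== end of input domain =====

-- B replaces A's build/strip/while-replace pipeline by one left-to-right pass with a
-- pending-separator flag (objective: alternative single-pass algorithm, same result).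

-- ===== PORT A =====
-- the 'while "__" in result: result = result.replace("__", "_")' loop, fueled by the
-- string length (each replace strictly shortens a string containing "__", so the fuel suffices)
def akWhile : Nat → List Char → List Char
  | 0, r => r
  | fuel+1, r =>
    if PySem.Chars.isIn ['_', '_'] r then akWhile fuel (PySem.Chars.replace r ['_', '_'] ['_'])
    else r

def clean_item_key (raw : String) : String :=
  let cleaned : List Char :=
    (PySem.Str.strip (PySem.Str.lower raw)).toList.foldl
      (fun acc c =>
        if PySem.Chars.isalnum c || c == '_' || c == '-' then acc ++ [c]
        else if c == ' ' || c == '/' then acc ++ ['_']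
        else acc) []
  let result := PySem.Chars.stripChars cleaned ['_']
  let result := akWhile result.length result
  String.ofList (PySem.Chars.slice result none (some 32))

-- ===== PORT B =====
def bStep (st : List Char × Bool) (c : Char) : List Char × Bool :=
  if PySem.Chars.isalnum c || c == '-' then
    ((if st.2 && !st.1.isEmpty then st.1 ++ ['_', c] else st.1 ++ [c]), false)
  else if c == ' ' || c == '/' || c == '_' then (st.1, true)
  else st

def clean_item_key_alt (raw : String) : String :=
  String.ofList (((PySem.Str.lower raw).toList.foldl bStep ([], false)).1.take 32)

-- ===== PRECONDITION & SPEC =====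
def Spec_clean_item_key (raw : String) (out : String) : Prop := out = clean_item_key_alt raw
instance (raw : String) (out : String) : Decidable (Spec_clean_item_key raw out) := by unfold Spec_clean_item_key; infer_instance

-- ===== CLAIM (what is proved, stated in full; the proofs are below) =====
def Claim_equal_clean_item_key : Prop := ∀ (raw : String), Dom_clean_item_key raw → Spec_clean_item_key raw (clean_item_key raw)

-- ===== LEMMAS AND PROOFS =====

def rep : List Char → List Char
  | '_' :: '_' :: t => '_' :: rep t
  | c :: t => c :: rep t
  | [] => []

def hasDD : List Char → Bool
  | '_' :: '_' :: _ => true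
  | _ :: t => hasDD t
  | [] => false

def cu : List Char → List Char
  | [] => []
  | [c] => [c]
  | a :: b :: t => if a = '_' ∧ b = '_' then cu (b :: t) else a :: cu (b :: t)

theorem rep_cons (c : Char) (t : List Char) :
    rep (c :: t) = if c = '_' ∧ t.head? = some '_' then '_' :: rep t.tail else c :: rep t := by
  rw [rep.eq_def]
  split
  · rename_i t2 h; injection h with h1 h2; subst h1; subst h2; simp
  · rename_i h1 h2
    injection h2 with e1 e2; subst e1; subst e2
    have hne : ¬(c = '_' ∧ t.head? = some '_') := by
      intro ⟨hc, hh⟩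
      subst hc
      cases t with
      | nil => simp at hh
      | cons b t2 => simp at hh; subst hh; exact h1 t2 rfl rfl
    rw [if_neg hne]
  · rename_i h; exact absurd h (by simp)

theorem hasDD_cons (c : Char) (t : List Char) :
    hasDD (c :: t) = if c = '_' ∧ t.head? = some '_' then true else hasDD t := by
  rw [hasDD.eq_def]
  split
  · rename_i t2 h; injection h with h1 h2; subst h1; subst h2; simp
  · rename_i h1 h2
    injection h2 with e1 e2; subst e1; subst e2
    have hne : ¬(c = '_' ∧ t.head? = some '_') := by
      intro ⟨hc, hh⟩
      subst hc
      cases t with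
      | nil => simp at hh
      | cons b t2 => simp at hh; subst hh; exact h1 t2 rfl rfl
    rw [if_neg hne]
  · rename_i h; exact absurd h (by simp)

theorem cu_cons (c : Char) (t : List Char) :
    cu (c :: t) = if c = '_' ∧ t.head? = some '_' then cu t else c :: cu t := by
  cases t with
  | nil => simp [cu]
  | cons b t2 => by_cases h : c = '_' ∧ b = '_' <;> simp [cu, h]

theorem rep_go (fuel : Nat) : ∀ (l acc : List Char), l.length ≤ fuel →
    PySem.Chars.replace.go ['_','_'] ['_'] fuel l acc = acc.reverse ++ rep l := by
  induction fuel with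
  | zero =>
    intro l acc h
    rw [List.length_eq_zero_iff.mp (Nat.le_zero.mp h)]
    rw [PySem.Chars.replace.go]; simp [rep]
  | succ fuel ih =>
    intro l acc h
    cases l with
    | nil => rw [PySem.Chars.replace.go]; simp [rep]; omega
    | cons c t =>
      by_cases hdd : c = '_' ∧ t.head? = some '_'
      · obtain ⟨rfl, hh⟩ := hdd
        cases t with
        | nil => simp at hh
        | cons b t2 =>
          simp at hh; subst hh
          rw [PySem.Chars.replace.go]
          have hp : ['_','_'].isPrefixOf ('_'::'_'::t2) = true := by simp [List.isPrefixOf]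
          simp only [hp, if_pos]
          have : List.drop ['_','_'].length ('_'::'_'::t2) = t2 := by simp
          rw [this, ih t2 (['_'].reverse ++ acc) (by simp at h ⊢; omega)]
          simp [rep]
      · have hnp : ¬(['_','_'].isPrefixOf (c :: t) = true) := by
          intro hp
          cases t with
          | nil => simp [List.isPrefixOf] at hp
          | cons b t2 =>
            simp [List.isPrefixOf] at hp
            exact hdd ⟨hp.1.symm, by simp [← hp.2]⟩
        rw [PySem.Chars.replace.go]
        simp only [hnp, if_neg, if_false]
        rw [ih t (c :: acc) (by simp at h ⊢; omega)]
        rw [rep_cons, if_neg hdd]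
        simp

theorem replace_eq_rep (r : List Char) : PySem.Chars.replace r ['_','_'] ['_'] = rep r := by
  rw [PySem.Chars.replace]
  simp only [List.isEmpty_cons, if_false, Bool.false_eq_true]
  rw [rep_go r.length r [] le_rfl]
  simp

theorem hasDD_eq_isIn (r : List Char) : PySem.Chars.isIn ['_','_'] r = hasDD r := by
  induction r with
  | nil => decide
  | cons c t ih =>
    rw [hasDD_cons]
    by_cases h : c = '_' ∧ t.head? = some '_'
    · rw [if_pos h]
      obtain ⟨rfl, hh⟩ := h
      cases t with
      | nil => simp at hh
      | cons b t2 =>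
        simp at hh; subst hh
        have : (['_','_'] : List Char) <:+: '_'::'_'::t2 := ⟨[], t2, rfl⟩
        rw [(PySem.Chars.isIn_iff_infix _ _).mpr this]
    · rw [if_neg h]
      rw [← ih]
      rcases hv : PySem.Chars.isIn ['_','_'] t with _ | _
      · -- t false → c::t false
        rcases hw : PySem.Chars.isIn ['_','_'] (c::t) with _ | _
        · rfl
        · exfalso
          have := (PySem.Chars.isIn_iff_infix _ _).mp hw
          rcases (List.infix_cons_iff).mp this with hpre | hinf
          · rcases hpre with ⟨rest, hr⟩
            injection hr with e1 e2
            subst e2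
            exact h ⟨e1.symm, rfl⟩
          · rw [(PySem.Chars.isIn_iff_infix _ _).mpr hinf] at hv; simp at hv
      · have := (PySem.Chars.isIn_iff_infix _ _).mp hv
        rw [(PySem.Chars.isIn_iff_infix ['_','_'] (c::t)).mpr (List.infix_cons_iff.mpr (Or.inr this))]

theorem rep_head? (t : List Char) : (rep t).head? = t.head? := by
  cases t with
  | nil => simp [rep]
  | cons c t2 =>
    rw [rep_cons]
    split
    · rename_i h; simp [h.1]
    · simp

theorem rep_length_le (t : List Char) : (rep t).length ≤ t.length := by
  induction t using rep.induct with
  | case1 t ih => simp [rep]; omega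
  | case2 c t h ih =>
    rw [rep_cons, if_neg]
    · simpa using ih
    · intro ⟨hc, hh⟩
      subst hc
      cases t with
      | nil => simp at hh
      | cons b t2 => simp at hh; exact h t2 rfl (by rw [hh])
  | case3 => simp [rep]

theorem rep_length_lt (t : List Char) (h : hasDD t = true) : (rep t).length < t.length := by
  induction t using rep.induct with
  | case1 t ih =>
    rw [rep_cons, if_pos ⟨rfl, rfl⟩]
    simp only [List.tail_cons, List.length_cons]
    have := rep_length_le t
    simp; omega
  | case2 c t hne ih =>
    have hne' : ¬(c = '_' ∧ t.head? = some '_') := by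
      intro ⟨hc, hh⟩
      subst hc
      cases t with
      | nil => simp at hh
      | cons b t2 => simp at hh; exact hne t2 rfl (by rw [hh])
    rw [rep_cons, if_neg hne']
    rw [hasDD_cons, if_neg hne'] at h
    have := ih h
    simp; omega
  | case3 => simp [hasDD] at h

theorem cu_of_not_hasDD (r : List Char) (h : hasDD r = false) : cu r = r := by
  induction r with
  | nil => simp [cu]
  | cons c t ih =>
    rw [hasDD_cons] at h
    split at h
    · simp at h
    · rw [cu_cons, if_neg (by assumption), ih h]

theorem cu_rep (r : List Char) : cu (rep r) = cu r := by
  induction r using rep.induct with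
  | case1 t ih =>
    -- r = '_' :: '_' :: t, rep r = '_' :: rep t
    show cu ('_' :: rep t) = cu ('_' :: '_' :: t)
    rw [cu_cons ('_' : Char) ('_' :: t), if_pos ⟨rfl, rfl⟩]
    rw [cu_cons ('_' : Char) (rep t), rep_head?]
    by_cases hb : t.head? = some '_'
    · rw [if_pos ⟨rfl, hb⟩, ih, cu_cons ('_' : Char) t, if_pos ⟨rfl, hb⟩]
    · rw [if_neg (by simp [hb]), ih, cu_cons ('_' : Char) t, if_neg (by simp [hb])]
  | case2 c t hne ih =>
    have hne' : ¬(c = '_' ∧ t.head? = some '_') := by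
      intro ⟨hc, hh⟩
      subst hc
      cases t with
      | nil => simp at hh
      | cons b t2 => simp at hh; exact hne t2 rfl (by rw [hh])
    rw [rep_cons, if_neg hne']
    rw [cu_cons, cu_cons, rep_head?, if_neg hne', if_neg hne', ih]
  | case3 => rfl

theorem akWhile_eq_cu (fuel : Nat) : ∀ r : List Char, r.length ≤ fuel → akWhile fuel r = cu r := by
  induction fuel with
  | zero =>
    intro r h
    rw [List.length_eq_zero_iff.mp (Nat.le_zero.mp h)]
    rfl
  | succ fuel ih =>
    intro r h
    rw [akWhile, hasDD_eq_isIn]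
    rcases hdd : hasDD r with _ | _
    · simp only [if_neg, Bool.false_eq_true, if_false]
      exact (cu_of_not_hasDD r hdd).symm
    · rw [if_pos rfl, replace_eq_rep]
      rw [ih (rep r) (by have := rep_length_lt r hdd; omega)]
      exact cu_rep r

def gmap (c : Char) : Option Char :=
  if PySem.Chars.isalnum c || c == '_' || c == '-' then some c
  else if c == ' ' || c == '/' then some '_' else none

def M : Bool → List Char → List Char
  | _, [] => []
  | p, c :: t => if c = '_' then M true t else (if p then '_' :: c :: M false t else c :: M false t)

def N : List Char → List Char
  | [] => []
  | c :: t => if c = '_' then N t else c :: M false t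

def cStep (st : List Char × Bool) (c : Char) : List Char × Bool :=
  if c == '_' then (st.1, true)
  else ((if st.2 && !st.1.isEmpty then st.1 ++ ['_', c] else st.1 ++ [c]), false)

theorem foldB_eq_foldC (s : List Char) : ∀ st : List Char × Bool,
    s.foldl bStep st = (s.filterMap gmap).foldl cStep st := by
  induction s with
  | nil => intro st; rfl
  | cons c t ih =>
    intro st
    simp only [List.foldl_cons, List.filterMap_cons]
    by_cases hk : PySem.Chars.isalnum c || c == '-'
    · have hne : ¬ c = '_' := by intro h; subst h; revert hk; decide
      have hg : gmap c = some c := by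
        unfold gmap
        rw [if_pos]
        rcases (Bool.or_eq_true _ _).mp hk with h | h
        · simp [h]
        · simp [h]
      rw [hg]
      simp only [List.foldl_cons]
      rw [ih]
      congr 1
      have hcb : ¬(c == '_') = true := by simpa using hne
      unfold bStep cStep
      rw [if_pos hk, if_neg hcb]
    · by_cases hsep : c == ' ' || c == '/' || c == '_'
      · have hg : gmap c = some '_' := by
          rcases (Bool.or_eq_true _ _).mp hsep with h | h
          · rcases (Bool.or_eq_true _ _).mp h with h2 | h2
            · rw [(beq_iff_eq).mp h2]; decide
            · rw [(beq_iff_eq).mp h2]; decide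
          · rw [(beq_iff_eq).mp h]; decide
        have hb : bStep st c = (st.1, true) := by
          unfold bStep
          rw [if_neg (by simpa using hk), if_pos hsep]
        have hc : cStep st '_' = (st.1, true) := by simp [cStep]
        rw [hg]
        simp only [List.foldl_cons]
        rw [ih, hb, hc]
      · simp only [Bool.or_eq_true, beq_iff_eq, not_or] at hk hsep
        have hg : gmap c = none := by
          unfold gmap
          rw [if_neg (by simp [hk.1, hk.2, hsep.2]), if_neg (by simp [hsep.1.1, hsep.1.2])]
        have hb : bStep st c = st := by
          unfold bStep
          rw [if_neg (by simp [hk.1, hk.2]), if_neg (by simp [hsep.1.1, hsep.1.2, hsep.2])]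
        rw [hg, hb]
        exact ih st

theorem foldC_ne_nil (t : List Char) : ∀ (out : List Char) (p : Bool), out ≠ [] →
    (t.foldl cStep (out, p)).1 = out ++ M p t := by
  induction t with
  | nil => intro out p h; simp [M]
  | cons c t ih =>
    intro out p h
    simp only [List.foldl_cons]
    by_cases hc : c = '_'
    · subst hc
      have : cStep (out, p) '_' = (out, true) := by simp [cStep]
      rw [this, ih out true h, M]
      simp
    · have hcb : ¬(c == '_') = true := by simpa using hc
      rcases p with _ | _
      · have : cStep (out, false) c = (out ++ [c], false) := by
          unfold cStep
          rw [if_neg hcb]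
          simp
        rw [this, ih _ false (by simp), M]
        simp [hc]
      · have : cStep (out, true) c = (out ++ ['_', c], false) := by
          unfold cStep
          rw [if_neg hcb]
          simp [List.isEmpty_iff, h]
        rw [this, ih _ false (by simp), M]
        simp [hc]

theorem foldC_nil (t : List Char) : ∀ p : Bool, (t.foldl cStep ([], p)).1 = N t := by
  induction t with
  | nil => intro p; simp [N]
  | cons c t ih =>
    intro p
    simp only [List.foldl_cons]
    by_cases hc : c = '_'
    · subst hc
      have : cStep (([] : List Char), p) '_' = ([], true) := by simp [cStep]
      rw [this, ih true, N]
      simp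
    · have hcb : ¬(c == '_') = true := by simpa using hc
      have : cStep (([] : List Char), p) c = ([c], false) := by
        unfold cStep
        rw [if_neg hcb]
        simp
      rw [this, foldC_ne_nil t [c] false (by simp), N]
      simp [hc]

theorem M_nil (p : Bool) : M p [] = [] := rfl
theorem M_cons (p : Bool) (c : Char) (t : List Char) :
    M p (c :: t) = if c = '_' then M true t else (if p then '_' :: c :: M false t else c :: M false t) := rfl
theorem N_cons (c : Char) (t : List Char) :
    N (c :: t) = if c = '_' then N t else c :: M false t := rfl

theorem M_all_underscore (vs : List Char) (h : ∀ c ∈ vs, c = '_') : ∀ p, M p vs = [] := by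
  induction vs with
  | nil => intro p; rfl
  | cons c t ih =>
    intro p
    rw [M_cons, if_pos (h c (by simp))]
    exact ih (fun c hc => h c (by simp [hc])) true

theorem M_append_underscores (x vs : List Char) (h : ∀ c ∈ vs, c = '_') :
    ∀ p, M p (x ++ vs) = M p x := by
  induction x with
  | nil =>
    intro p
    simp only [List.nil_append]
    rw [M_all_underscore vs h p, M_nil]
  | cons c t ih =>
    intro p
    simp only [List.cons_append]
    rw [M_cons, M_cons]
    by_cases hc : c = '_'
    · rw [if_pos hc, if_pos hc, ih]
    · rw [if_neg hc, if_neg hc, ih]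

theorem N_append_underscores (x vs : List Char) (h : ∀ c ∈ vs, c = '_') :
    N (x ++ vs) = N x := by
  induction x with
  | nil =>
    simp only [List.nil_append]
    induction vs with
    | nil => rfl
    | cons c t ih2 =>
      rw [N_cons, if_pos (h c (by simp))]
      exact ih2 (fun c hc => h c (by simp [hc]))
  | cons c t ih =>
    simp only [List.cons_append]
    rw [N_cons, N_cons]
    by_cases hc : c = '_'
    · rw [if_pos hc, if_pos hc, ih]
    · rw [if_neg hc, if_neg hc, M_append_underscores t vs h]

theorem N_underscores_append (us x : List Char) (h : ∀ c ∈ us, c = '_') :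
    N (us ++ x) = N x := by
  induction us with
  | nil => rfl
  | cons c t ih =>
    simp only [List.cons_append]
    rw [N_cons, if_pos (h c (by simp))]
    exact ih (fun c hc => h c (by simp [hc]))

-- no-trailing-underscore lists: M false computes cu; M true computes cu ('_' :: ·)
theorem M_eq_cu (n : Nat) : ∀ t : List Char, t.length ≤ n → t.getLast? ≠ some '_' →
    (M false t = cu t ∧ (t ≠ [] → M true t = cu ('_' :: t))) := by
  induction n with
  | zero =>
    intro t h _
    rw [List.length_eq_zero_iff.mp (Nat.le_zero.mp h)]
    exact ⟨rfl, by simp⟩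
  | succ n ih =>
    intro t hlen hlast
    cases t with
    | nil => exact ⟨rfl, by simp⟩
    | cons c t2 =>
      have hlast2 : t2.getLast? ≠ some '_' := by
        cases t2 with
        | nil => simp
        | cons b t3 => rw [List.getLast?_cons_cons] at hlast; exact hlast
      have hlen2 : t2.length ≤ n := by simp at hlen; omega
      have iht := ih t2 hlen2 hlast2
      by_cases hc : c = '_'
      · subst hc
        have ht2ne : t2 ≠ [] := by
          intro h0
          subst h0
          simp at hlast
        constructor
        · rw [M_cons, if_pos rfl]
          exact iht.2 ht2ne
        · intro _
          rw [M_cons, if_pos rfl, iht.2 ht2ne,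
              cu_cons ('_' : Char) ('_' :: t2), if_pos ⟨rfl, rfl⟩]
      · constructor
        · rw [M_cons, if_neg hc, if_neg (by simp), cu_cons, if_neg (by intro h0; exact hc h0.1), iht.1]
        · intro _
          rw [M_cons, if_neg hc, if_pos rfl, iht.1,
              cu_cons ('_' : Char) (c :: t2), if_neg (by intro h0; simp at h0; exact hc h0),
              cu_cons c t2]
          split
          · rename_i h0
            exact absurd h0.1 hc
          · rfl
theorem char_le_left (a c : Char) : (a ≤ c) ↔ a.toNat ≤ c.toNat := by
  rw [Char.le_def, UInt32.le_iff_toNat_le]; rfl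

theorem gmap_cond_of_isspace (c : Char) (h : PySem.Chars.isspace c = true) :
    (PySem.Chars.isalnum c || c == '_' || c == '-') = false := by
  have hu : ¬ c = '_' := by intro e; subst e; revert h; decide
  have hm : ¬ c = '-' := by intro e; subst e; revert h; decide
  simp only [PySem.Chars.isspace, decide_eq_true_eq, Bool.or_eq_true, Bool.and_eq_true] at h
  simp only [PySem.Chars.isalnum, PySem.Chars.isalpha, PySem.Chars.isdigit,
    PySem.Chars.isupper, PySem.Chars.islower, char_le_left, Bool.or_eq_false_iff,
    Bool.and_eq_false_iff, decide_eq_false_iff_not, beq_eq_false_iff_ne, ne_eq,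
    show 'A'.toNat = 65 from rfl, show 'Z'.toNat = 90 from rfl, show 'a'.toNat = 97 from rfl,
    show 'z'.toNat = 122 from rfl, show '0'.toNat = 48 from rfl, show '9'.toNat = 57 from rfl]
  exact ⟨⟨⟨by omega, by omega⟩, hu⟩, hm⟩

theorem gmap_isspace (c x : Char) (h : PySem.Chars.isspace c = true) (hg : gmap c = some x) :
    x = '_' := by
  unfold gmap at hg
  rw [gmap_cond_of_isspace c h, if_neg (by simp)] at hg
  split at hg
  · injection hg with e; exact e.symm
  · exact absurd hg (by simp)

theorem filterMap_gmap_isspace (w : List Char) (h : ∀ c ∈ w, PySem.Chars.isspace c = true) :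
    ∀ x ∈ w.filterMap gmap, x = '_' := by
  intro x hx
  rcases List.mem_filterMap.mp hx with ⟨c, hc, hg⟩
  exact gmap_isspace c x (h c hc) hg

theorem dropWhile_head_not (p : Char → Bool) (l : List Char) :
    ∀ a, (l.dropWhile p).head? = some a → p a = false := by
  induction l with
  | nil => intro a h; simp at h
  | cons c t ih =>
    intro a h
    rw [List.dropWhile_cons] at h
    split at h
    · exact ih a h
    · simp at h; subst h; rename_i h2; simpa using h2

theorem mem_takeWhile_p (p : Char → Bool) (l : List Char) (a : Char) (h : a ∈ l.takeWhile p) :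
    p a = true := by
  induction l with
  | nil => simp at h
  | cons c t ih =>
    rw [List.takeWhile_cons] at h
    split at h
    · rcases List.mem_cons.mp h with e | hm
      · subst e; assumption
      · exact ih hm
    · simp at h

-- decomposition of s ↦ (dropWhile p (dropWhile p s).reverse).reverse (the shape of strip and stripChars)
theorem ddr_decomp (p : Char → Bool) (u : List Char) :
    ∃ us vs, u = us ++ (List.dropWhile p (List.dropWhile p u).reverse).reverse ++ vs ∧
      (∀ c ∈ us, p c = true) ∧ (∀ c ∈ vs, p c = true) := by
  refine ⟨u.takeWhile p, (List.takeWhile p (List.dropWhile p u).reverse).reverse, ?_, ?_, ?_⟩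
  · have h1 : List.dropWhile p u =
        (List.dropWhile p (List.dropWhile p u).reverse).reverse ++
        (List.takeWhile p (List.dropWhile p u).reverse).reverse := by
      conv_lhs => rw [← List.reverse_reverse (List.dropWhile p u)]
      rw [← List.reverse_append, List.takeWhile_append_dropWhile]
    conv_lhs => rw [← List.takeWhile_append_dropWhile (p := p) (l := u), h1]
    rw [List.append_assoc]
  · intro c hc; exact mem_takeWhile_p p u c hc
  · intro c hc
    rw [List.mem_reverse] at hc
    exact mem_takeWhile_p p _ c hc

theorem ddr_head (p : Char → Bool) (u : List Char) :
    ∀ a, ((List.dropWhile p (List.dropWhile p u).reverse).reverse).head? = some a → p a = false := by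
  intro a h
  set r := (List.dropWhile p (List.dropWhile p u).reverse).reverse with hr
  have h1 : List.dropWhile p u = r ++ (List.takeWhile p (List.dropWhile p u).reverse).reverse := by
    rw [hr]
    conv_lhs => rw [← List.reverse_reverse (List.dropWhile p u)]
    rw [← List.reverse_append, List.takeWhile_append_dropWhile]
  have hne : r ≠ [] := by intro h0; rw [h0] at h; simp at h
  have : (List.dropWhile p u).head? = some a := by
    rw [h1, List.head?_append_of_ne_nil _ hne]  -- name?
    exact h
  exact dropWhile_head_not p u a this

theorem ddr_last (p : Char → Bool) (u : List Char) :
    ∀ a, ((List.dropWhile p (List.dropWhile p u).reverse).reverse).getLast? = some a → p a = false := by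
  intro a h
  rw [List.getLast?_eq_head?_reverse, List.reverse_reverse] at h
  exact dropWhile_head_not p (List.dropWhile p u).reverse a h

theorem N_eq_cu (r : List Char) (hh : ∀ a, r.head? = some a → ¬ a = '_')
    (hl : ∀ a, r.getLast? = some a → ¬ a = '_') : N r = cu r := by
  cases r with
  | nil => rfl
  | cons c t =>
    have hc : ¬ c = '_' := hh c rfl
    rw [N_cons, if_neg hc, cu_cons, if_neg (fun h0 => hc h0.1)]
    congr 1
    cases t with
    | nil => rfl
    | cons b t2 =>
      refine (M_eq_cu (b :: t2).length (b :: t2) le_rfl ?_).1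
      intro h0
      exact hl '_' (by rw [List.getLast?_cons_cons]; exact h0) rfl

theorem foldA_eq_filterMap (s : List Char) : ∀ acc : List Char,
    s.foldl (fun acc c =>
      if PySem.Chars.isalnum c || c == '_' || c == '-' then acc ++ [c]
      else if c == ' ' || c == '/' then acc ++ ['_'] else acc) acc = acc ++ s.filterMap gmap := by
  induction s with
  | nil => intro acc; simp
  | cons c t ih =>
    intro acc
    simp only [List.foldl_cons, List.filterMap_cons]
    by_cases h1 : PySem.Chars.isalnum c || c == '_' || c == '-'
    · rw [if_pos h1]
      have hg : gmap c = some c := by unfold gmap; rw [if_pos h1]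
      rw [hg, ih]
      simp
    · rw [if_neg h1]
      by_cases h2 : c == ' ' || c == '/'
      · rw [if_pos h2]
        have hg : gmap c = some '_' := by unfold gmap; rw [if_neg h1, if_pos h2]
        rw [hg, ih]
        simp
      · have hg : gmap c = none := by unfold gmap; rw [if_neg h1, if_neg h2]
        rw [if_neg h2, hg, ih]

theorem strip_is_ddr (s : List Char) :
    PySem.Chars.strip s =
      (List.dropWhile PySem.Chars.isspace (List.dropWhile PySem.Chars.isspace s).reverse).reverse := rfl

theorem stripChars_is_ddr (s : List Char) :
    PySem.Chars.stripChars s ['_'] =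
      (List.dropWhile (fun c => (['_'] : List Char).contains c)
        (List.dropWhile (fun c => (['_'] : List Char).contains c) s).reverse).reverse := rfl

theorem pcontains_underscore (c : Char) (h : (['_'] : List Char).contains c = true) : c = '_' := by
  simpa using h

theorem core (s : List Char) :
    akWhile (PySem.Chars.stripChars ((PySem.Chars.strip s).foldl
        (fun acc c =>
          if PySem.Chars.isalnum c || c == '_' || c == '-' then acc ++ [c]
          else if c == ' ' || c == '/' then acc ++ ['_'] else acc) []) ['_']).length
      (PySem.Chars.stripChars ((PySem.Chars.strip s).foldl
        (fun acc c =>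
          if PySem.Chars.isalnum c || c == '_' || c == '-' then acc ++ [c]
          else if c == ' ' || c == '/' then acc ++ ['_'] else acc) []) ['_'])
    = (s.foldl bStep ([], false)).1 := by
  rw [foldB_eq_foldC, foldC_nil, foldA_eq_filterMap, List.nil_append]
  rw [akWhile_eq_cu _ _ le_rfl]
  -- goal : cu (stripChars t' ['_']) = N (filterMap gmap s), t' = filterMap gmap (strip s)
  obtain ⟨w1, w2, hs, hw1, hw2⟩ := ddr_decomp PySem.Chars.isspace s
  rw [← strip_is_ddr] at hs
  have hN1 : N (s.filterMap gmap) = N ((PySem.Chars.strip s).filterMap gmap) := by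
    conv_lhs => rw [hs]
    rw [List.filterMap_append, List.filterMap_append, List.append_assoc]
    rw [N_underscores_append _ _ (filterMap_gmap_isspace w1 hw1)]
    rw [N_append_underscores _ _ (filterMap_gmap_isspace w2 hw2)]
  obtain ⟨us, vs, ht, hus, hvs⟩ :=
    ddr_decomp (fun c => (['_'] : List Char).contains c) ((PySem.Chars.strip s).filterMap gmap)
  rw [← stripChars_is_ddr] at ht
  have hN2 : N ((PySem.Chars.strip s).filterMap gmap)
      = N (PySem.Chars.stripChars ((PySem.Chars.strip s).filterMap gmap) ['_']) := by
    conv_lhs => rw [ht]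
    rw [List.append_assoc]
    rw [N_underscores_append _ _ (fun c hc => pcontains_underscore c (hus c hc))]
    rw [N_append_underscores _ _ (fun c hc => pcontains_underscore c (hvs c hc))]
  rw [hN1, hN2]
  rw [N_eq_cu]
  · intro a ha hae
    subst hae
    have := ddr_head (fun c => (['_'] : List Char).contains c)
      ((PySem.Chars.strip s).filterMap gmap) '_' (by rw [← stripChars_is_ddr] at *; exact ha)
    simp at this
  · intro a ha hae
    subst hae
    have := ddr_last (fun c => (['_'] : List Char).contains c)
      ((PySem.Chars.strip s).filterMap gmap) '_' (by rw [← stripChars_is_ddr] at *; exact ha)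
    simp at this


-- ===== VERDICT (by name: the statement is the Claim_ definition above) =====
theorem clean_item_key_spec : Claim_equal_clean_item_key := by
  intro raw _
  unfold Spec_clean_item_key clean_item_key clean_item_key_alt
  simp only [PySem.Str.toList_strip, PySem.Str.toList_lower]
  rw [core (PySem.Chars.lower raw.toList)]
  rw [PySem.Chars.slice_eq_listSlice, show (32 : Int) = ((32 : Nat) : Int) from rfl,
    PySem.List.slice_to_natCast]
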